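-- pv_equiv track=rewrite | github.com/Stiegemeierr/ELC123---Comunica-o-de-Dados | Trabalho1/codificadores.py | nrz_i
-- ===== SOURCE A (Python) =====
-- def nrz_i(bits: str) -> list[int]:
--     result = []
--     level = -1
--     for bit in bits:
--         if bit == '1':
--             level *= -1
--         result.append(level)
--     return result
-- ===== SOURCE B (Python) =====
-- def nrz_i(bits: str) -> list[int]:
--     # Block construction: collect the positions of the '1' bits; the output is
--     # constant between consecutive '1' positions (the level flips AT each '1'),
--     # so emit whole runs with list-replication instead of a per-character toggle.
--     ones = [i for i, ch in enumerate(bits) if ch == '1']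
--     out = []
--     prev = 0
--     level = -1
--     for b in ones + [len(bits)]:
--         out.extend([level] * (b - prev))
--         prev = b
--         level = -level
--     return out
-- ===== Notes on version B (the rewrite author's own statement) =====
-- stated objective: alternative
-- what changed: Instead of toggling a level per character, B first collects the index positions of the '1' bits and then builds the output as whole constant runs (list replication) between consecutive '1' positions, with the level alternating per run.
import Mathlib
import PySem

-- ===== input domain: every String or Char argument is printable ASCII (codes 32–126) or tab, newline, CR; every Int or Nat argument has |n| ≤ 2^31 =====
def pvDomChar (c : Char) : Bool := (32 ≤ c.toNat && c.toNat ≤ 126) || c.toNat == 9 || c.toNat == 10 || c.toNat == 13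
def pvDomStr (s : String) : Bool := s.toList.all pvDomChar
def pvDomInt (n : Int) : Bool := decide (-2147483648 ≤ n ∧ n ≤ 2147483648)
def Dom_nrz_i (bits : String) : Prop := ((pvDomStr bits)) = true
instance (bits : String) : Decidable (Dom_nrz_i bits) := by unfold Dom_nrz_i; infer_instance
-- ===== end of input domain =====

-- B replaces A's per-character level toggle with a run/block construction: positions of '1' bits, then replicated constant runs; objective: alternative, same cost.


-- ===== PORT A =====
-- literal port of A's loop: one state `level`, flipped on '1', emitted each step
def nrzGoA : List Char → Int → List Int
  | [], _ => []
  | b :: rest, level =>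
    let level' := if b = '1' then level * (-1) else level
    level' :: nrzGoA rest level'

def nrz_i (bits : String) : List Int := nrzGoA bits.toList (-1)

-- ===== PORT B =====
-- positions (indices) of the '1' characters, enumerating from i
def onesIdx : List Char → Nat → List Nat
  | [], _ => []
  | c :: rest, i => if c = '1' then i :: onesIdx rest (i + 1) else onesIdx rest (i + 1)

-- the fill loop: for each boundary b, emit a constant run of length b - prev, then flip
def fillGo : List Nat → Nat → Int → List Int
  | [], _, _ => []
  | b :: rest, prev, level => List.replicate (b - prev) level ++ fillGo rest b (-level)

def nrz_i_alt (bits : String) : List Int :=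
  fillGo (onesIdx bits.toList 0 ++ [bits.toList.length]) 0 (-1)

-- ===== PRECONDITION & SPEC =====
def Spec_nrz_i (bits : String) (out : List Int) : Prop := out = nrz_i_alt bits
instance (bits : String) (out : List Int) : Decidable (Spec_nrz_i bits out) := by unfold Spec_nrz_i; infer_instance

-- ===== CLAIM (what is proved, stated in full; the proofs are below) =====
def Claim_equal_nrz_i : Prop := ∀ (bits : String), Dom_nrz_i bits → Spec_nrz_i bits (nrz_i bits)

-- ===== LEMMAS AND PROOFS =====
theorem onesIdx_ge {cs : List Char} {o x : Nat} (h : x ∈ onesIdx cs o) : o ≤ x := by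
  induction cs generalizing o with
  | nil => simp [onesIdx] at h
  | cons c rest ih =>
    simp only [onesIdx] at h
    split at h
    · rcases List.mem_cons.mp h with rfl | h
      · exact le_refl _
      · exact Nat.le_of_succ_le (ih h)
    · exact Nat.le_of_succ_le (ih h)

theorem fillGo_shift (b : Nat) (rest : List Nat) (prev : Nat) (v : Int) (h : prev < b) :
    fillGo (b :: rest) prev v = v :: fillGo (b :: rest) (prev + 1) v := by
  simp only [fillGo]
  have : b - prev = (b - (prev + 1)) + 1 := by omega
  rw [this, List.replicate_succ]
  simp

theorem fillGo_eq_nrzGoA (cs : List Char) (off : Nat) (level : Int) :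
    fillGo (onesIdx cs off ++ [off + cs.length]) off level = nrzGoA cs level := by
  induction cs generalizing off level with
  | nil => simp [onesIdx, fillGo, nrzGoA]
  | cons c rest ih =>
    have hshift : ∀ v : Int,
        fillGo (onesIdx rest (off + 1) ++ [off + 1 + rest.length]) off v
          = v :: fillGo (onesIdx rest (off + 1) ++ [off + 1 + rest.length]) (off + 1) v := by
      intro v
      cases hl : onesIdx rest (off + 1) with
      | nil => simp only [List.nil_append]; exact fillGo_shift _ _ _ _ (by omega)
      | cons b t =>
        have hb : off + 1 ≤ b := onesIdx_ge (hl ▸ List.mem_cons_self ..)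
        simp only [List.cons_append]
        exact fillGo_shift _ _ _ _ (by omega)
    by_cases h : c = '1'
    · simp only [onesIdx, nrzGoA, h, if_true, List.cons_append, fillGo,
        Nat.sub_self, List.replicate_zero, List.nil_append, List.length_cons, mul_neg_one]
      rw [show off + (rest.length + 1) = off + 1 + rest.length from by omega]
      rw [hshift (-level), ih]
    · simp only [onesIdx, nrzGoA, h, ite_false, List.length_cons]
      rw [show off + (rest.length + 1) = off + 1 + rest.length from by omega]
      rw [hshift level, ih]

-- ===== VERDICT (by name: the statement is the Claim_ definition above) =====
theorem nrz_i_spec : Claim_equal_nrz_i := by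
  intro bits _
  show nrz_i bits = nrz_i_alt bits
  rw [nrz_i, nrz_i_alt]
  rw [show bits.toList.length = 0 + bits.toList.length by omega]
  exact (fillGo_eq_nrzGoA bits.toList 0 (-1)).symm
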